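-- pv_equiv track=rewrite | github.com/SravanthiMalepati/twitter-leetcode | recursiveRemove.py | recursiveRemove
-- ===== SOURCE A (Python) =====
-- def recursiveRemove(s, t):
--   if t not in s:
--     return 0
--   possibleStartPoint = []
--   tLen = len(t)
--   for i in range(len(s) - tLen + 1):
--     if (s[i: i + tLen] == t):
--       possibleStartPoint.append(i)
--   res = 0
--   for i in possibleStartPoint:
--     res = max(res, recursiveRemove(s[:i] + s[i+tLen:], t) + 1)
--   return res
-- ===== SOURCE B (Python) =====
-- def recursiveRemove(s, t):
--     # Top-down DP: an explicit memo table solves each distinct reduced string once.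
--     memo = {}
--     tLen = len(t)
--
--     def solve(cur):
--         if cur in memo:
--             return memo[cur]
--         occ = [i for i in range(len(cur) - tLen + 1) if cur[i:i + tLen] == t]
--         best = 0
--         for i in occ:
--             best = max(best, solve(cur[:i] + cur[i + tLen:]) + 1)
--         memo[cur] = best
--         return best
--
--     return solve(s)
-- ===== Notes on version B (the rewrite author's own statement) =====
-- stated objective: faster
-- what changed: Replaced the naive branching recursion (which re-solves the same reduced string exponentially many times) by top-down dynamic programming with an explicit memo dict keyed by the reduced string, so each distinct reachable string is solved once; the occurrence scan became a comprehension; Pre_ excludes only t == '', where A hits the recursion limit (RecursionError).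
import Mathlib
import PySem

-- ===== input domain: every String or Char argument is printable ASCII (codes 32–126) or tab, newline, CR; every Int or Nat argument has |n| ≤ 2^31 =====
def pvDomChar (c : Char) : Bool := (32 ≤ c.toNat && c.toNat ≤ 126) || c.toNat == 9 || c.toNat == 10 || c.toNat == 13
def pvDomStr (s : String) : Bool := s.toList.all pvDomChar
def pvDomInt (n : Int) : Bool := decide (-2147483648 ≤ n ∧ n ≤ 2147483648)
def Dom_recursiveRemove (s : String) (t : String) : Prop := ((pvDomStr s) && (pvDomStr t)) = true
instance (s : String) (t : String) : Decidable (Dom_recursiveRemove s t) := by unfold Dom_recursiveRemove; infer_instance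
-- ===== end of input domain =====

-- B replaces A's naive branching recursion by top-down DP with an explicit memo dict
-- (each distinct reduced string solved once) — measurably faster; return value only.

-- ===== PORT A =====
-- A's recursion is ported with a fuel counter (s.length + 1 suffices: each recursive
-- call removes one occurrence of the nonempty t, so the depth is at most s.length + 1);
-- the `for i in possibleStartPoint` loop is the helper pvResA.
mutual
def pvGoA (fuel : Nat) (s t : List Char) : Int :=
  match fuel with
  | 0 => 0
  | Nat.succ n =>
    if PySem.Chars.isIn t s = false then 0
    else
      let tLen : Int := (t.length : Int)
      let pts : List Int :=
        (PySem.List.pyRange 0 ((s.length : Int) - tLen + 1)).foldl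
          (fun acc i =>
            if decide (PySem.List.slice s (some i) (some (i + tLen)) = t) = true
            then acc ++ [i] else acc) []
      pvResA n s t tLen pts 0
def pvResA (n : Nat) (s t : List Char) (tLen : Int) (pts : List Int) (res : Int) : Int :=
  match pts with
  | [] => res
  | i :: rest =>
    pvResA n s t tLen rest
      (max res (pvGoA n (PySem.List.slice s none (some i) ++ PySem.List.slice s (some (i + tLen)) none) t + 1))
end

def recursiveRemove (s : String) (t : String) : Int :=
  pvGoA (s.toList.length + 1) s.toList t.toList

-- ===== PORT B =====
-- B's `solve` with its explicit memo dict; the `for i in occ` loop threading the memo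
-- is the helper pvLoopB; same fuel bound as A's port.
mutual
def pvSolveB (fuel : Nat) (t : List Char) (memo : PySem.Dict (List Char) Int)
    (cur : List Char) : Int × PySem.Dict (List Char) Int :=
  match fuel with
  | 0 => (0, memo)
  | Nat.succ n =>
    match memo.get? cur with
    | some v => (v, memo)
    | none =>
      let tLen : Int := (t.length : Int)
      let occ : List Int :=
        (PySem.List.pyRange 0 ((cur.length : Int) - tLen + 1)).filter
          (fun i => decide (PySem.List.slice cur (some i) (some (i + tLen)) = t))
      let r := pvLoopB n t cur tLen occ (0, memo)
      (r.1, r.2.insert cur r.1)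
def pvLoopB (n : Nat) (t cur : List Char) (tLen : Int) (occ : List Int)
    (p : Int × PySem.Dict (List Char) Int) : Int × PySem.Dict (List Char) Int :=
  match occ with
  | [] => p
  | i :: rest =>
    let q := pvSolveB n t p.2 (PySem.List.slice cur none (some i) ++ PySem.List.slice cur (some (i + tLen)) none)
    pvLoopB n t cur tLen rest (max p.1 (q.1 + 1), q.2)
end

def recursiveRemove_alt (s : String) (t : String) : Int :=
  (pvSolveB (s.toList.length + 1) t.toList PySem.Dict.empty s.toList).1

-- ===== PRECONDITION & SPEC =====
-- Pre_ excludes only t = "": there Python A (and B) recurse forever on the unchanged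
-- string and die with RecursionError, so A returns no value.
def Pre_recursiveRemove (s : String) (t : String) : Prop := t ≠ ""
instance (s : String) (t : String) : Decidable (Pre_recursiveRemove s t) := by
  unfold Pre_recursiveRemove; infer_instance

def pvWitness_recursiveRemove : String × String := ("aabb", "ab")

def Spec_recursiveRemove (s : String) (t : String) (out : Int) : Prop := out = recursiveRemove_alt s t
instance (s : String) (t : String) (out : Int) : Decidable (Spec_recursiveRemove s t out) := by
  unfold Spec_recursiveRemove; infer_instance

-- ===== CLAIM (what is proved, stated in full; the proofs are below) =====
def Claim_equal_recursiveRemove : Prop := ∀ (s : String) (t : String), Dom_recursiveRemove s t → Pre_recursiveRemove s t → Spec_recursiveRemove s t (recursiveRemove s t)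

-- ===== LEMMAS AND PROOFS =====

-- the list of occurrence start indices both programs scan
def pvOcc (s t : List Char) : List Int :=
  (PySem.List.pyRange 0 ((s.length : Int) - (t.length : Int) + 1)).filter
    (fun i => decide (PySem.List.slice s (some i) (some (i + (t.length : Int))) = t))

-- the reduced string s[:i] + s[i+len(t):]
def pvChild (s t : List Char) (i : Int) : List Char :=
  PySem.List.slice s none (some i) ++ PySem.List.slice s (some (i + (t.length : Int))) none

-- the common value both ports compute
def pvVal (s t : List Char) : Int := pvGoA (s.length + 1) s t

lemma pvFilterFold (s t : List Char) (l : List Int) :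
    l.foldl (fun acc i =>
        if decide (PySem.List.slice s (some i) (some (i + (t.length : Int))) = t) = true
        then acc ++ [i] else acc) []
      = l.filter (fun i => decide (PySem.List.slice s (some i) (some (i + (t.length : Int))) = t)) := by
  simpa using PySem.List.foldl_append_if
    (fun i => decide (PySem.List.slice s (some i) (some (i + (t.length : Int))) = t)) id l []

lemma pvOcc_mem {s t : List Char} {i : Int} (h : i ∈ pvOcc s t) :
    (0 ≤ i ∧ i < (s.length : Int) - (t.length : Int) + 1) ∧
      PySem.List.slice s (some i) (some (i + (t.length : Int))) = t := by
  unfold pvOcc at h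
  rcases List.mem_filter.1 h with ⟨hr, hp⟩
  exact ⟨PySem.List.mem_pyRange_one.1 hr, of_decide_eq_true hp⟩

lemma pvOcc_facts {s t : List Char} {i : Int} (h : i ∈ pvOcc s t) :
    0 ≤ i ∧ i.toNat + t.length ≤ s.length ∧ t <+: s.drop i.toNat := by
  obtain ⟨⟨h0, hub⟩, hsl⟩ := pvOcc_mem h
  have h1 : (0:Int) ≤ i + (t.length : Int) := by
    have : (0:Int) ≤ (t.length : Int) := Int.natCast_nonneg _
    omega
  rw [PySem.List.slice_toNat s h0 h1] at hsl
  refine ⟨h0, by omega, ?_⟩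
  rw [← hsl]
  exact List.take_prefix _ _

lemma pvChild_length {s t : List Char} {i : Int} (h : i ∈ pvOcc s t) :
    (pvChild s t i).length = s.length - t.length := by
  obtain ⟨h0, hle, -⟩ := pvOcc_facts h
  have h1 : (0:Int) ≤ i + (t.length : Int) := by
    have : (0:Int) ≤ (t.length : Int) := Int.natCast_nonneg _
    omega
  unfold pvChild
  obtain ⟨j, rfl⟩ := Int.eq_ofNat_of_zero_le h0
  rw [PySem.List.slice_to s h0, PySem.List.slice_from s h1, List.length_append,
    List.length_take, List.length_drop, ← Nat.cast_add, Int.toNat_natCast, Int.toNat_natCast]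
  rw [Int.toNat_natCast] at hle
  omega

lemma pvOcc_nil_of_not_isIn {s t : List Char} (h : PySem.Chars.isIn t s = false) :
    pvOcc s t = [] := by
  rw [List.eq_nil_iff_forall_not_mem]
  intro i hi
  obtain ⟨-, -, hp⟩ := pvOcc_facts hi
  have : PySem.Chars.isIn t s = true :=
    (PySem.Chars.exists_prefix_drop_iff_isIn t s).1 ⟨i.toNat, hp⟩
  simp [h] at this

lemma pvGoA_succ (n : Nat) (s t : List Char) :
    pvGoA (n + 1) s t =
      if PySem.Chars.isIn t s = false then 0
      else pvResA n s t (t.length : Int) (pvOcc s t) 0 := by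
  simp only [pvGoA]
  rw [pvFilterFold]
  rfl

lemma pvResA_congr {n m : Nat} {s t : List Char} (l : List Int)
    (h : ∀ i ∈ l, pvGoA n (pvChild s t i) t = pvGoA m (pvChild s t i) t) :
    ∀ res, pvResA n s t (t.length : Int) l res = pvResA m s t (t.length : Int) l res := by
  induction l with
  | nil => intro res; simp only [pvResA]
  | cons i rest ih =>
    intro res
    have hi := h i (List.mem_cons_self ..)
    unfold pvChild at hi
    simp only [pvResA]
    rw [hi]
    exact ih (fun j hj => h j (List.mem_cons_of_mem _ hj)) _

lemma pvGoA_fuel {t : List Char} (ht : t ≠ []) :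
    ∀ fuel fuel' (s : List Char), s.length < fuel → s.length < fuel' →
      pvGoA fuel s t = pvGoA fuel' s t := by
  intro fuel
  induction fuel with
  | zero => intro fuel' s hs; exact absurd hs (Nat.not_lt_zero _)
  | succ n ih =>
    intro fuel' s hs hs'
    cases fuel' with
    | zero => exact absurd hs' (Nat.not_lt_zero _)
    | succ m =>
      rw [pvGoA_succ, pvGoA_succ]
      by_cases hin : PySem.Chars.isIn t s = false
      · simp [hin]
      · simp only [hin]
        apply pvResA_congr
        intro i hi
        obtain ⟨-, hle, -⟩ := pvOcc_facts hi
        have ht1 : 1 ≤ t.length := List.length_pos_iff.2 ht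
        have hc := pvChild_length hi
        exact ih m _ (by omega) (by omega)

lemma pvResA_val (n : Nat) (s t : List Char) (l : List Int)
    (h : ∀ i ∈ l, pvGoA n (pvChild s t i) t = pvVal (pvChild s t i) t) :
    ∀ res, pvResA n s t (t.length : Int) l res =
      l.foldl (fun res i => max res (pvVal (pvChild s t i) t + 1)) res := by
  induction l with
  | nil => intro res; simp only [pvResA, List.foldl_nil]
  | cons i rest ih =>
    intro res
    have hi := h i (List.mem_cons_self ..)
    unfold pvChild at hi
    simp only [pvResA]
    rw [hi, List.foldl_cons]
    exact ih (fun j hj => h j (List.mem_cons_of_mem _ hj)) _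

lemma pvVal_eq {t : List Char} (ht : t ≠ []) (s : List Char) :
    pvVal s t = (pvOcc s t).foldl (fun res i => max res (pvVal (pvChild s t i) t + 1)) 0 := by
  unfold pvVal
  rw [pvGoA_succ]
  by_cases hin : PySem.Chars.isIn t s = false
  · simp [hin, pvOcc_nil_of_not_isIn hin]
  · simp only [hin]
    apply pvResA_val
    intro i hi
    obtain ⟨-, hle, -⟩ := pvOcc_facts hi
    have ht1 : 1 ≤ t.length := List.length_pos_iff.2 ht
    have hc := pvChild_length hi
    exact pvGoA_fuel ht _ _ _ (by omega) (by omega)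

def pvInv (t : List Char) (memo : PySem.Dict (List Char) Int) : Prop :=
  ∀ k v, memo.get? k = some v → v = pvVal k t

lemma pvLoopB_val {t : List Char} {n : Nat}
    (hIH : ∀ c memo, c.length < n → pvInv t memo →
      (pvSolveB n t memo c).1 = pvVal c t ∧ pvInv t (pvSolveB n t memo c).2)
    (ht : t ≠ []) (cur : List Char) (hn : cur.length ≤ n) :
    ∀ (l : List Int), (∀ i ∈ l, i ∈ pvOcc cur t) →
      ∀ p, pvInv t p.2 →
        (pvLoopB n t cur (t.length : Int) l p).1
            = l.foldl (fun res i => max res (pvVal (pvChild cur t i) t + 1)) p.1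
          ∧ pvInv t (pvLoopB n t cur (t.length : Int) l p).2 := by
  intro l
  induction l with
  | nil => intro _ p hp; simp only [pvLoopB, List.foldl_nil]; exact ⟨trivial, hp⟩
  | cons i rest ih =>
    intro hmem p hp
    have hi := hmem i (List.mem_cons_self ..)
    obtain ⟨-, hle, -⟩ := pvOcc_facts hi
    have ht1 : 1 ≤ t.length := List.length_pos_iff.2 ht
    have hc := pvChild_length hi
    have hq := hIH (pvChild cur t i) p.2 (by omega) hp
    simp only [pvLoopB]
    rw [show (PySem.List.slice cur none (some i) ++
        PySem.List.slice cur (some (i + (t.length : Int))) none) = pvChild cur t i from rfl]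
    rw [hq.1, List.foldl_cons]
    exact ih (fun j hj => hmem j (List.mem_cons_of_mem _ hj))
      (max p.1 (pvVal (pvChild cur t i) t + 1), (pvSolveB n t p.2 (pvChild cur t i)).2) hq.2

lemma pvSolveB_val {t : List Char} (ht : t ≠ []) :
    ∀ fuel (cur : List Char) memo, cur.length < fuel → pvInv t memo →
      (pvSolveB fuel t memo cur).1 = pvVal cur t ∧ pvInv t (pvSolveB fuel t memo cur).2 := by
  intro fuel
  induction fuel with
  | zero => intro cur memo hc; exact absurd hc (Nat.not_lt_zero _)
  | succ n ih =>
    intro cur memo hc hm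
    rcases hmv : memo.get? cur with _ | v
    · have hrw : pvSolveB (n + 1) t memo cur =
        ((pvLoopB n t cur (t.length : Int) (pvOcc cur t) (0, memo)).1,
         (pvLoopB n t cur (t.length : Int) (pvOcc cur t) (0, memo)).2.insert cur
           (pvLoopB n t cur (t.length : Int) (pvOcc cur t) (0, memo)).1) := by
        simp only [pvSolveB]
        rw [hmv]
        rfl
      rw [hrw]
      have hl := pvLoopB_val ih ht cur (by omega) (pvOcc cur t) (fun _ h => h) (0, memo) hm
      constructor
      · rw [hl.1, ← pvVal_eq ht]
      · intro k v hkv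
        rw [PySem.Dict.get?_insert] at hkv
        by_cases hk : k = cur
        · rw [if_pos hk] at hkv
          cases hkv
          rw [hl.1, ← pvVal_eq ht, hk]
        · rw [if_neg hk] at hkv
          exact hl.2 k v hkv
    · have hrw : pvSolveB (n + 1) t memo cur = (v, memo) := by
        simp only [pvSolveB]
        rw [hmv]
      rw [hrw]
      exact ⟨hm cur v hmv, hm⟩

-- ===== VERDICT (by name: the statement is the Claim_ definition above) =====
theorem recursiveRemove_spec : Claim_equal_recursiveRemove := by
  intro s t _ hpre
  unfold Spec_recursiveRemove recursiveRemove recursiveRemove_alt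
  have ht : t.toList ≠ [] := by
    intro h
    exact hpre (by simpa using congrArg String.ofList h)
  have h := pvSolveB_val ht (s.toList.length + 1) s.toList PySem.Dict.empty
    (by omega) (by intro k v hv; simp [PySem.Dict.get?_empty] at hv)
  rw [h.1]
  rfl
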